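-- pv_equiv track=rewrite | github.com/ilialecha/Programming_1 | Lists/List_8/chain7.py | is_power7
-- ===== SOURCE A (Python) =====
-- def is_power7(n):
--     p=0
--     if n == 0:
--         return False
--     while n != 1:
--         if n%7 != 0:
--             return False
--         n = n//7
--         p+=1
--     return True
-- ===== SOURCE B (Python) =====
-- def is_power7(n):
--     # Multiply a power of 7 upward and compare, instead of dividing n down.
--     if n < 1:
--         return False
--     p = 1
--     while p < n:
--         p *= 7
--     return p == n
-- ===== Notes on version B (the rewrite author's own statement) =====
-- stated objective: alternative
-- what changed: B grows a power of seven upward by repeated multiplication until it reaches or passes n and then compares it with n, instead of A's repeated divisibility test and floor division of n downward.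
import Mathlib
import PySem

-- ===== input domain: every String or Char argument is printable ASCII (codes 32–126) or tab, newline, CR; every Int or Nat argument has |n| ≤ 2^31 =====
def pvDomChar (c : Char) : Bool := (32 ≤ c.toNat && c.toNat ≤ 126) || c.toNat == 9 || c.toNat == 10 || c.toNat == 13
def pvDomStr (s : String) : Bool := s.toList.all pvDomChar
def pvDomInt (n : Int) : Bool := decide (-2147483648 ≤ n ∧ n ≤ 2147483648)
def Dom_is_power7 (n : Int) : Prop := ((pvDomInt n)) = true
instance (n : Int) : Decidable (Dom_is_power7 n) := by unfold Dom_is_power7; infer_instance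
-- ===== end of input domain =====

-- B replaces A's divide-n-down-by-7 loop with a grow-a-power-of-7-up-and-compare loop (alternative decomposition, same cost).


-- ===== PORT A =====
-- A's 'while n != 1' loop, carried as a recursion on the shrinking |n| (the dead counter p is dropped).
def is_power7Loop (n : Int) (h : n ≠ 0) : Bool :=
  if hn : n = 1 then true
  else if hm : PySem.Int.mod n 7 ≠ 0 then false
  else
    is_power7Loop (PySem.Int.floordiv n 7)
      (by
        have hd : (7 : Int) ∣ n := (PySem.Int.mod_eq_zero_iff_dvd n 7).1 (by omega)
        obtain ⟨k, hk⟩ := hd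
        have : PySem.Int.floordiv n 7 = k := by
          rw [PySem.Int.floordiv_eq_iff_of_pos (by norm_num)]; omega
        rw [this]; intro hk0; exact h (by omega))
termination_by n.natAbs
decreasing_by
  have hd : (7 : Int) ∣ n := (PySem.Int.mod_eq_zero_iff_dvd n 7).1 (by omega)
  obtain ⟨k, hk⟩ := hd
  have hfk : PySem.Int.floordiv n 7 = k := by
    rw [PySem.Int.floordiv_eq_iff_of_pos (by norm_num)]; omega
  rw [hfk]; omega

def is_power7 (n : Int) : Bool :=
  if h : n = 0 then false
  else is_power7Loop n h

-- ===== PORT B =====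
-- B's 'while p < n: p *= 7' loop, carried as a recursion on the shrinking gap n - p.
def is_power7AltLoop (p n : Int) (hp : 1 ≤ p) : Bool :=
  if h : p < n then is_power7AltLoop (p * 7) n (by omega)
  else decide (p = n)
termination_by (n - p).toNat
decreasing_by omega

def is_power7_alt (n : Int) : Bool :=
  if n < 1 then false
  else is_power7AltLoop 1 n (le_refl 1)

-- ===== PRECONDITION & SPEC =====
def Spec_is_power7 (n : Int) (out : Bool) : Prop := out = is_power7_alt n
instance (n : Int) (out : Bool) : Decidable (Spec_is_power7 n out) := by unfold Spec_is_power7; infer_instance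

-- ===== CLAIM (what is proved, stated in full; the proofs are below) =====
def Claim_equal_is_power7 : Prop := ∀ (n : Int), Dom_is_power7 n → Spec_is_power7 n (is_power7 n)

-- ===== LEMMAS AND PROOFS =====

theorem is_power7Loop_iff : ∀ (N : ℕ) (n : Int) (h : n ≠ 0), n.natAbs ≤ N →
    (is_power7Loop n h = true ↔ ∃ k : ℕ, n = 7 ^ k) := by
  intro N
  induction N with
  | zero => intro n h hle; omega
  | succ N ih =>
    intro n h hle
    rw [is_power7Loop]
    by_cases hn : n = 1
    · rw [dif_pos hn]
      constructor
      · intro _; exact ⟨0, by simp [hn]⟩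
      · intro _; rfl
    · rw [dif_neg hn]
      by_cases hm : PySem.Int.mod n 7 ≠ 0
      · rw [dif_pos hm]
        constructor
        · intro hfalse; exact absurd hfalse (by simp)
        · rintro ⟨k, hk⟩
          cases k with
          | zero => exact absurd hk (by simpa using hn)
          | succ j =>
            exfalso; apply hm
            rw [PySem.Int.mod_eq_zero_iff_dvd]
            exact ⟨7 ^ j, by rw [hk]; ring⟩
      · rw [dif_neg hm]
        have hd : (7 : Int) ∣ n := (PySem.Int.mod_eq_zero_iff_dvd n 7).1 (by omega)
        obtain ⟨q, hq⟩ := hd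
        have hfq : PySem.Int.floordiv n 7 = q := by
          rw [PySem.Int.floordiv_eq_iff_of_pos (by norm_num)]; omega
        have hq0 : q ≠ 0 := by intro h0; exact h (by omega)
        have habs : q.natAbs ≤ N := by
          have h7 : n.natAbs = 7 * q.natAbs := by
            have := congrArg Int.natAbs hq
            simpa [Int.natAbs_mul] using this
          omega
        rw [ih (PySem.Int.floordiv n 7) _ (by rw [hfq]; exact habs)]
        rw [hfq]
        constructor
        · rintro ⟨k, hk⟩
          refine ⟨k + 1, ?_⟩
          rw [hq, hk]; ring
        · rintro ⟨k, hk⟩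
          cases k with
          | zero => exact absurd hk (by simpa using hn)
          | succ j =>
            refine ⟨j, ?_⟩
            have : (7 : Int) * q = 7 * 7 ^ j := by
              rw [← hq, hk]; ring
            have := mul_left_cancel₀ (by norm_num : (7:Int) ≠ 0) this
            exact this

theorem is_power7AltLoop_iff : ∀ (N : ℕ) (p n : Int) (hp : 1 ≤ p), (n - p).toNat ≤ N →
    (is_power7AltLoop p n hp = true ↔ ∃ m : ℕ, n = p * 7 ^ m) := by
  intro N
  induction N with
  | zero =>
    intro p n hp hle
    rw [is_power7AltLoop]
    have hnp : ¬ p < n := by omega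
    rw [dif_neg hnp]
    simp only [decide_eq_true_eq]
    constructor
    · intro he; exact ⟨0, by rw [pow_zero, mul_one]; omega⟩
    · rintro ⟨m, hm⟩
      have h1 : (1 : Int) ≤ 7 ^ m := one_le_pow₀ (by norm_num)
      have : p ≤ p * 7 ^ m := le_mul_of_one_le_right (by omega) h1
      omega
  | succ N ih =>
    intro p n hp hle
    rw [is_power7AltLoop]
    by_cases h : p < n
    · rw [dif_pos h]
      rw [ih (p * 7) n (by omega) (by omega)]
      constructor
      · rintro ⟨m, hm⟩; exact ⟨m + 1, by rw [hm]; ring⟩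
      · rintro ⟨m, hm⟩
        cases m with
        | zero => exfalso; rw [hm] at h; simp at h
        | succ j => exact ⟨j, by rw [hm]; ring⟩
    · rw [dif_neg h]
      simp only [decide_eq_true_eq]
      constructor
      · intro he; exact ⟨0, by rw [pow_zero, mul_one]; omega⟩
      · rintro ⟨m, hm⟩
        have h1 : (1 : Int) ≤ 7 ^ m := one_le_pow₀ (by norm_num)
        have : p ≤ p * 7 ^ m := le_mul_of_one_le_right (by omega) h1
        omega

-- ===== VERDICT (by name: the statement is the Claim_ definition above) =====
theorem is_power7_spec : Claim_equal_is_power7 := by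
  intro n _
  unfold Spec_is_power7 is_power7 is_power7_alt
  by_cases h0 : n = 0
  · simp [h0]
  · simp only [h0, dif_neg, not_false_iff]
    by_cases hlt : n < 1
    · simp only [hlt, if_pos]
      rw [Bool.eq_false_iff]
      intro htrue
      obtain ⟨k, hk⟩ := (is_power7Loop_iff n.natAbs n h0 (le_refl _)).1 htrue
      have : (1 : Int) ≤ 7 ^ k := one_le_pow₀ (by norm_num)
      omega
    · simp only [hlt, if_neg, not_false_iff]
      rw [Bool.eq_iff_iff]
      rw [is_power7Loop_iff n.natAbs n h0 (le_refl _),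
          is_power7AltLoop_iff (n - 1).toNat 1 n (le_refl 1) (le_refl _)]
      simp
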